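-- pv_equiv track=rewrite | github.com/miguelarhb/Redes-18-19 | client.py | check_port
-- ===== SOURCE A (Python) =====
-- def check_port(data):
--   lenght=len(data)
--   words=0
--   port_sup=""
--   for e in range(0,lenght):
--
--     if(data[e]==" "):
--
--       words+=1
--     elif(words==2 and data[e]!=" "):
--       port_sup+=data[e]
--     elif(words>3):
--       break
--   return port_sup
-- ===== SOURCE B (Python) =====
-- def check_port(data):
--   parts = data.split(" ")
--   return parts[2] if len(parts) > 2 else ""
-- ===== Notes on version B (the rewrite author's own statement) =====
-- stated objective: simpler
-- what changed: Replaces the manual character scan with a space counter and accumulator by tokenizing once with str.split on a single-space separator and selecting segment index 2, with an empty-string fallback when there are fewer than three segments.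
import Mathlib
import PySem

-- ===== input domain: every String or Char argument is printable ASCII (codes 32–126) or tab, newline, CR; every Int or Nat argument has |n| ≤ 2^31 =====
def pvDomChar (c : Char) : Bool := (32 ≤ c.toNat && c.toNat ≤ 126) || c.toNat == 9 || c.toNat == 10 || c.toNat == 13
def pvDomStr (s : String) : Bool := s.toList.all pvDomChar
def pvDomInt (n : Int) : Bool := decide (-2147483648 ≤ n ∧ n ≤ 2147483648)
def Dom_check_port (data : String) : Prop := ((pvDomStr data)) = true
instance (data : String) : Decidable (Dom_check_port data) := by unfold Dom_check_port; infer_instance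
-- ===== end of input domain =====

-- B replaces A's manual character scan (space counter + accumulator) by split(" ") and
-- selecting segment index 2; objective: simpler.

-- ===== PORT A =====
-- A's for-loop over indices 0..len-1 reads data[e] in order; ported as the structural
-- recursion over the character list with the loop state (words, port_sup); the break
-- returns the accumulator.
def checkPortLoopA : List Char → Int → List Char → List Char
  | [], _, acc => acc
  | c :: t, words, acc =>
    if c = ' ' then checkPortLoopA t (words + 1) acc
    else if words = 2 ∧ c ≠ ' ' then checkPortLoopA t words (acc ++ [c])
    else if words > 3 then acc
    else checkPortLoopA t words acc

def check_port (data : String) : String :=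
  String.ofList (checkPortLoopA data.toList 0 [])

-- ===== PORT B =====
def check_port_alt (data : String) : String :=
  let parts := (PySem.Str.split? data " ").getD []   -- data.split(" "); sep ≠ "" so never none
  if 2 < parts.length then parts.getD 2 "" else ""

-- ===== PRECONDITION & SPEC =====
def Spec_check_port (data : String) (out : String) : Prop := out = check_port_alt data
instance (data : String) (out : String) : Decidable (Spec_check_port data out) := by unfold Spec_check_port; infer_instance

-- ===== CLAIM (what is proved, stated in full; the proofs are below) =====
def Claim_equal_check_port : Prop := ∀ (data : String), Dom_check_port data → Spec_check_port data (check_port data)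

-- ===== LEMMAS AND PROOFS =====

-- segments of a char list split at ' ' (reference model for both sides)
def pvSplitSp : List Char → List (List Char)
  | [] => [[]]
  | c :: t => if c = ' ' then [] :: pvSplitSp t else
      match pvSplitSp t with
      | [] => [[c]]
      | h :: t' => (c :: h) :: t'

def pvConsHead (pre : List Char) : List (List Char) → List (List Char)
  | [] => [pre]
  | h :: t => (pre ++ h) :: t

theorem pvSplitSp_ne_nil (l : List Char) : pvSplitSp l ≠ [] := by
  cases l with
  | nil => simp [pvSplitSp]
  | cons c t =>
    simp only [pvSplitSp]
    split
    · simp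
    · cases h : pvSplitSp t <;> simp

theorem pvSplitSp_sp (t : List Char) : pvSplitSp (' ' :: t) = [] :: pvSplitSp t := by
  simp [pvSplitSp]

theorem pvSplitSp_ch (c : Char) (t : List Char) (h' : List Char) (t' : List (List Char))
    (hc : ¬ c = ' ') (hs : pvSplitSp t = h' :: t') : pvSplitSp (c :: t) = (c :: h') :: t' := by
  simp [pvSplitSp, hc, hs]

theorem pvGo_eq (fuel : Nat) (l cur : List Char) (acc : List (List Char))
    (h : l.length < fuel) :
    PySem.Chars.splitOn.go [' '] fuel l cur acc
      = acc.reverse ++ pvConsHead cur.reverse (pvSplitSp l) := by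
  induction fuel generalizing l cur acc with
  | zero => omega
  | succ f ih =>
    cases l with
    | nil =>
      simp [PySem.Chars.splitOn.go, pvSplitSp, pvConsHead]
    | cons c rest =>
      rw [PySem.Chars.splitOn.go]
      by_cases hc : c = ' '
      · subst hc
        rw [if_pos (by simp [List.isPrefixOf])]
        simp only [List.length_cons, List.length_nil, List.drop_succ_cons, List.drop_zero]
        rw [ih rest [] (cur.reverse :: acc) (by simpa using Nat.lt_of_succ_lt_succ h)]
        simp only [pvSplitSp_sp, pvConsHead]
        cases hs : pvSplitSp rest with
        | nil => exact absurd hs (pvSplitSp_ne_nil rest)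
        | cons h' t' => simp
      · rw [if_neg (by simp [List.isPrefixOf]; exact fun e => hc e.symm)]
        rw [ih rest (c :: cur) acc (by simpa using Nat.lt_of_succ_lt_succ h)]
        simp only [pvSplitSp, if_neg hc, List.reverse_cons]
        cases hs : pvSplitSp rest with
        | nil => exact absurd hs (pvSplitSp_ne_nil rest)
        | cons h' t' => simp [pvConsHead, List.append_assoc]

theorem pvSplitOn_eq (l : List Char) : PySem.Chars.splitOn l [' '] = pvSplitSp l := by
  unfold PySem.Chars.splitOn
  rw [pvGo_eq (l.length + 1) l [] [] (Nat.lt_succ_self _)]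
  cases hs : pvSplitSp l with
  | nil => exact absurd hs (pvSplitSp_ne_nil l)
  | cons h t => simp [pvConsHead]

-- A's loop computes the (2 - words)-th segment, appended to the accumulator
theorem pvLoopA_eq (cs : List Char) : ∀ (w : Int), 0 ≤ w → ∀ acc,
    checkPortLoopA cs w acc
      = acc ++ (if w ≤ 2 then (pvSplitSp cs).getD (2 - w).toNat [] else []) := by
  induction cs with
  | nil =>
    intro w hw acc
    show acc = _
    split
    · cases h2 : (2 - w).toNat <;> simp [pvSplitSp]
    · simp
  | cons c t ih =>
    intro w hw acc
    show (if c = ' ' then checkPortLoopA t (w + 1) acc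
        else if w = 2 ∧ c ≠ ' ' then checkPortLoopA t w (acc ++ [c])
        else if w > 3 then acc else checkPortLoopA t w acc) = _
    by_cases hc : c = ' '
    · subst hc
      rw [if_pos rfl, ih (w + 1) (by omega) acc, pvSplitSp_sp]
      by_cases h1 : w ≤ 1
      · rw [if_pos (show w + 1 ≤ 2 by omega), if_pos (show w ≤ 2 by omega)]
        have hk : (2 - w).toNat = (2 - (w + 1)).toNat + 1 := by omega
        rw [hk, List.getD_cons_succ]
      · by_cases h2 : w ≤ 2
        · rw [if_neg (show ¬ w + 1 ≤ 2 by omega), if_pos h2]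
          have hk : (2 - w).toNat = 0 := by omega
          rw [hk, List.getD_cons_zero]
        · rw [if_neg (show ¬ w + 1 ≤ 2 by omega), if_neg h2]
    · rw [if_neg hc]
      by_cases h2 : w = 2
      · subst h2
        rw [if_pos ⟨rfl, hc⟩, ih 2 (by omega) (acc ++ [c])]
        cases hs : pvSplitSp t with
        | nil => exact absurd hs (pvSplitSp_ne_nil t)
        | cons h' t' =>
          rw [pvSplitSp_ch c t h' t' hc hs]
          simp [List.getD]
      · rw [if_neg (fun ⟨e, _⟩ => h2 e)]
        by_cases h3 : w > 3
        · rw [if_pos h3, if_neg (by omega)]; simp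
        · rw [if_neg h3, ih w hw acc]
          by_cases hle : w ≤ 2
          · rw [if_pos hle, if_pos hle]
            cases hs : pvSplitSp t with
            | nil => exact absurd hs (pvSplitSp_ne_nil t)
            | cons h' t' =>
              rw [pvSplitSp_ch c t h' t' hc hs]
              have hk : (2 - w).toNat = (1 - w).toNat + 1 := by omega
              rw [hk, List.getD_cons_succ, List.getD_cons_succ]
          · rw [if_neg hle, if_neg hle]

theorem pvMapGetD (l : List (List Char)) (n : Nat) :
    (l.map String.ofList).getD n "" = String.ofList (l.getD n []) := by
  by_cases h : n < l.length
  · simp [List.getD, List.getElem?_map, List.getElem?_eq_getElem (by simpa using h)]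
  · rw [List.getD_eq_default _ _ (by simpa using Nat.le_of_not_lt h),
      List.getD_eq_default _ _ (Nat.le_of_not_lt h)]

theorem pvGetD_of_short (l : List (List Char)) (h : ¬ 2 < l.length) :
    l.getD 2 [] = [] := List.getD_eq_default _ _ (Nat.le_of_not_lt h)

-- ===== VERDICT (by name: the statement is the Claim_ definition above) =====
theorem check_port_spec : Claim_equal_check_port := by
  intro data _
  unfold Spec_check_port check_port check_port_alt
  have hsplit : PySem.Str.split? data " " = some ((pvSplitSp data.toList).map String.ofList) := by
    unfold PySem.Str.split? PySem.Chars.split?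
    simp [pvSplitOn_eq]
  rw [hsplit]
  simp only [Option.getD_some]
  rw [pvLoopA_eq data.toList 0 (by omega) []]
  simp only [if_pos (by omega : (0:Int) ≤ 2), List.nil_append,
    show ((2:Int) - 0).toNat = 2 from rfl]
  by_cases h : 2 < ((pvSplitSp data.toList).map String.ofList).length
  · rw [if_pos h, pvMapGetD]
  · rw [if_neg h, pvGetD_of_short _ (by simpa using h)]
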